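-- pv_equiv track=rewrite | github.com/Naibitx/SFComparativeAnalysis | backend/app/routes/runs.py | normalize_task_a_code
-- ===== SOURCE A (Python) =====
-- def normalize_task_a_code(code: str, input_file: str) -> str:
--     replacements = [
--         "example.txt",
--         "your_file.txt",
--         "my_text_file.txt",
--         "file.txt",
--         "input.txt",
--         "sample.txt",
--         "sample_input.txt",
--     ]
--
--     for name in replacements:
--         code = code.replace(f'"{name}"', f'"{input_file}"')
--         code = code.replace(f"'{name}'", f"'{input_file}'")
--
--     return code
-- ===== SOURCE B (Python) =====
-- PLACEHOLDERS = (
--     "example.txt",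
--     "your_file.txt",
--     "my_text_file.txt",
--     "file.txt",
--     "input.txt",
--     "sample.txt",
--     "sample_input.txt",
-- )
--
--
-- def normalize_task_a_code(code: str, input_file: str) -> str:
--     # Single left-to-right scan: at each quote character, if a placeholder name
--     # followed by the same quote comes next, emit quote+input_file+quote and skip
--     # past the whole quoted placeholder; otherwise copy the character.
--     out = []
--     i = 0
--     n = len(code)
--     while i < n:
--         c = code[i]
--         if c == '"' or c == "'":
--             for name in PLACEHOLDERS:
--                 j = i + 1 + len(name)
--                 if j < n and code[i + 1:j] == name and code[j] == c:
--                     out.append(c + input_file + c)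
--                     i = j + 1
--                     break
--             else:
--                 out.append(c)
--                 i += 1
--         else:
--             out.append(c)
--             i += 1
--     return "".join(out)
-- ===== Notes on version B (the rewrite author's own statement) =====
-- stated objective: alternative
-- what changed: B replaces A's fourteen sequential str.replace passes (one per quoted placeholder) by a single left-to-right scan of code that, at each quote character, checks the seven placeholder names once and emits quote+input_file+quote in place of a matched quoted placeholder.
-- outside the precondition, e.g. on normalize_task_a_code("'example.txt'", "x'file.txt"): A returns "'x'x'file.txt'", B returns "'x'file.txt'"; on normalize_task_a_code("'example.txt'", 'file.txt'): A returns "'file.txt'", B returns "'file.txt'"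
import Mathlib
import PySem

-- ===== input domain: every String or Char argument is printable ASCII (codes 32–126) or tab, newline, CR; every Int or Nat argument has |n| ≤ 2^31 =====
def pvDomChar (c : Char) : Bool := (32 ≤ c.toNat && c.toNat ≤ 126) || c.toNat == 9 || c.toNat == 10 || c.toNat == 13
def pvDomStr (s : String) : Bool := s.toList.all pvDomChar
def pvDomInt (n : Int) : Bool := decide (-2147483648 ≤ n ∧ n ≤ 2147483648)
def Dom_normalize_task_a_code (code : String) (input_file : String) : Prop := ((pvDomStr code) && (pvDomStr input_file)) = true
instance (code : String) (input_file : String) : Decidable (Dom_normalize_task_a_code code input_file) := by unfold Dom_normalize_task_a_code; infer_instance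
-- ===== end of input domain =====

-- B replaces A's fourteen sequential str.replace passes by one left-to-right scan that rewrites
-- each quoted placeholder filename in a single traversal (alternative decomposition, same result on Pre_).


-- ===== PORT A =====
-- A's placeholder list
def pvNamesS : List String :=
  ["example.txt", "your_file.txt", "my_text_file.txt", "file.txt", "input.txt", "sample.txt", "sample_input.txt"]

def normalize_task_a_code (code : String) (input_file : String) : String :=
  pvNamesS.foldl (fun c name =>
    let c1 := PySem.Str.replace c ("\"" ++ name ++ "\"") ("\"" ++ input_file ++ "\"")
    PySem.Str.replace c1 ("'" ++ name ++ "'") ("'" ++ input_file ++ "'")) code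

-- ===== PORT B =====
-- the placeholder names as character lists (PLACEHOLDERS of Source B)
def pvCharNames : List (List Char) := pvNamesS.map String.toList

-- first placeholder name (in tuple order) such that rest starts with name ++ [c]
def pvFindName (c : Char) (rest : List Char) : Option (List Char) :=
  pvCharNames.find? (fun n => (n ++ [c]).isPrefixOf rest)

-- the scanning loop of Source B: copy characters; at a quote that opens a quoted
-- placeholder, emit quote ++ input_file ++ quote and skip past the closing quote
def pvScan (f : List Char) : List Char → List Char
  | [] => []
  | c :: rest =>
    if c = '"' ∨ c = '\'' then
      match pvFindName c rest with
      | some n => (c :: (f ++ [c])) ++ pvScan f (rest.drop (n.length + 1))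
      | none => c :: pvScan f rest
    else c :: pvScan f rest
termination_by l => l.length
decreasing_by
  · simp only [List.length_cons]
    exact Nat.lt_succ_of_le (by simp)
  · simp
  · simp

def normalize_task_a_code_alt (code : String) (input_file : String) : String :=
  String.ofList (pvScan input_file.toList code.toList)

-- ===== PRECONDITION & SPEC =====
def pvQuotes : List Char := ['"', '\'']
-- a quoted placeholder occurrence: q name q
def pvPat (q : Char) (n : List Char) : List Char := q :: (n ++ [q])
-- two quoted placeholder occurrences sharing their middle quote: q n1 q n2 q
def pvChain (q : Char) (n1 n2 : List Char) : List Char := q :: (n1 ++ (q :: (n2 ++ [q])))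
def pvNoPatB (l : List Char) : Bool :=
  pvQuotes.all fun q => pvCharNames.all fun n => ! PySem.Chars.isIn (pvPat q n) l
def pvNoChainB (l : List Char) : Bool :=
  pvQuotes.all fun q => pvCharNames.all fun n1 => pvCharNames.all fun n2 => ! PySem.Chars.isIn (pvChain q n1 n2) l
def pvQFreeB (l : List Char) : Bool := l.all fun c => !(c == '"' || c == '\'')

-- Pre_ excludes the inputs where A's fourteen sequential passes can re-match text produced by an
-- earlier pass (an artefact of A's pass order): it admits every code containing no quoted
-- placeholder at all, and otherwise requires that input_file contains no quote character and is
-- not itself a placeholder name, and that no two quoted placeholders in code share a quote character.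
def Pre_normalize_task_a_code (code : String) (input_file : String) : Prop :=
  (pvNoPatB code.toList ||
    (pvNoChainB code.toList && pvQFreeB input_file.toList && !(pvCharNames.contains input_file.toList))) = true

instance (code : String) (input_file : String) : Decidable (Pre_normalize_task_a_code code input_file) := by
  unfold Pre_normalize_task_a_code; infer_instance

def pvWitness_normalize_task_a_code : String × String := ("open(\"example.txt\")", "data.csv")

def Spec_normalize_task_a_code (code : String) (input_file : String) (out : String) : Prop := out = normalize_task_a_code_alt code input_file
instance (code : String) (input_file : String) (out : String) : Decidable (Spec_normalize_task_a_code code input_file out) := by unfold Spec_normalize_task_a_code; infer_instance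

-- ===== CLAIM (what is proved, stated in full; the proofs are below) =====
def Claim_equal_normalize_task_a_code : Prop := ∀ (code : String) (input_file : String), Dom_normalize_task_a_code code input_file → Pre_normalize_task_a_code code input_file → Spec_normalize_task_a_code code input_file (normalize_task_a_code code input_file)

-- ===== LEMMAS AND PROOFS =====

-- Prop forms of the precondition's Boolean tests
def pvNoPat (l : List Char) : Prop := ∀ q ∈ pvQuotes, ∀ n ∈ pvCharNames, ¬ pvPat q n <:+: l
def pvNoChain (l : List Char) : Prop := ∀ q ∈ pvQuotes, ∀ n1 ∈ pvCharNames, ∀ n2 ∈ pvCharNames, ¬ pvChain q n1 n2 <:+: l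
def pvQFree (l : List Char) : Prop := ∀ c ∈ l, c ≠ '"' ∧ c ≠ '\''

theorem pvNoPat_iff (l : List Char) : pvNoPatB l = true ↔ pvNoPat l := by
  simp [pvNoPatB, pvNoPat, PySem.Chars.isIn_eq_false_iff]

theorem pvNoChain_iff (l : List Char) : pvNoChainB l = true ↔ pvNoChain l := by
  simp [pvNoChainB, pvNoChain, PySem.Chars.isIn_eq_false_iff]

theorem pvQFree_iff (l : List Char) : pvQFreeB l = true ↔ pvQFree l := by
  simp [pvQFreeB, pvQFree]

-- fuel-free restatement of PySem.Chars.replace for a nonempty pattern q :: w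
def pvRep (q : Char) (w r : List Char) : List Char → List Char
  | [] => []
  | c :: t => if (q :: w) <+: (c :: t) then r ++ pvRep q w r (t.drop w.length) else c :: pvRep q w r t
termination_by l => l.length
decreasing_by
  · simp only [List.length_cons]
    exact Nat.lt_succ_of_le (by simp)
  · simp

theorem pvGo_eq (q : Char) (w r : List Char) :
    ∀ fuel l acc, l.length ≤ fuel →
      PySem.Chars.replace.go (q :: w) r fuel l acc = acc.reverse ++ pvRep q w r l := by
  intro fuel
  induction fuel with
  | zero =>
    intro l acc h
    have : l = [] := List.length_eq_zero_iff.mp (Nat.le_zero.mp h)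
    subst this
    simp [PySem.Chars.replace.go, pvRep]
  | succ n ih =>
    intro l acc h
    cases l with
    | nil => simp [PySem.Chars.replace.go, pvRep]
    | cons c t =>
      rw [PySem.Chars.replace.go]
      by_cases hp : (q :: w) <+: (c :: t)
      · rw [if_pos (List.isPrefixOf_iff_prefix.mpr hp)]
        have hd : List.drop (q :: w).length (c :: t) = t.drop w.length := by
          simp [List.drop_succ_cons]
        rw [hd, ih _ _ (le_trans (by simp) (Nat.le_of_succ_le_succ h))]
        rw [pvRep, if_pos hp]
        simp
      · rw [if_neg (by simpa [List.isPrefixOf_iff_prefix] using hp)]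
        rw [ih _ _ (Nat.le_of_succ_le_succ h)]
        rw [pvRep, if_neg hp]
        simp

theorem pvReplace_eq (q : Char) (w r l : List Char) :
    PySem.Chars.replace l (q :: w) r = pvRep q w r l := by
  rw [PySem.Chars.replace]
  simp [pvGo_eq q w r l.length l [] (le_refl _)]

-- basic pvRep equations
theorem pvRep_nil (q : Char) (w r : List Char) : pvRep q w r [] = [] := by rw [pvRep]

theorem pvRep_cons_neg (q : Char) (w r : List Char) (c : Char) (t : List Char)
    (h : ¬ (q :: w) <+: (c :: t)) : pvRep q w r (c :: t) = c :: pvRep q w r t := by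
  rw [pvRep, if_neg h]

theorem pvRep_matched (q : Char) (w r t : List Char) :
    pvRep q w r ((q :: w) ++ t) = r ++ pvRep q w r t := by
  rw [List.cons_append, pvRep, if_pos (by simpa using List.prefix_append _ _)]
  simp

-- a quote-free block passes through unchanged
theorem pvRep_qfree_append (q : Char) (w r : List Char) (hq : q = '"' ∨ q = '\'')
    (u : List Char) (hu : pvQFree u) (v : List Char) :
    pvRep q w r (u ++ v) = u ++ pvRep q w r v := by
  induction u with
  | nil => simp
  | cons a u' ih =>
    have ha := hu a (by simp)
    have hne : ¬ (q :: w) <+: (a :: (u' ++ v)) := by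
      intro hp
      rcases List.cons_prefix_cons.mp hp with ⟨hqa, -⟩
      rcases hq with h | h <;> simp [← hqa, h] at ha
    rw [List.cons_append, pvRep_cons_neg _ _ _ _ _ hne,
      ih (fun c hc => hu c (by simp [hc]))]
    simp

theorem pvRep_noop (q : Char) (w r : List Char) :
    ∀ l, ¬ (q :: w) <:+: l → pvRep q w r l = l := by
  intro l
  induction l with
  | nil => intro _; exact pvRep_nil _ _ _
  | cons c t ih =>
    intro h
    rw [pvRep_cons_neg _ _ _ _ _ (fun hp => h (hp.isInfix)),
      ih (fun hi => h (List.infix_cons_iff.mpr (Or.inr hi)))]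

-- facts about the placeholder names
theorem pvNames_qfree : ∀ n ∈ pvCharNames, pvQFree n := by
  have h : pvCharNames.all pvQFreeB = true := by rfl
  intro n hn
  exact (pvQFree_iff n).mp (List.all_eq_true.mp h n hn)

-- two quote-free words followed by the same quote: if a++[q] is a prefix of b++[q]++x then a = b
theorem pvLemU (q : Char) (hq : q = '"' ∨ q = '\'') :
    ∀ (a b x : List Char), pvQFree a → pvQFree b → (a ++ [q]) <+: (b ++ ([q] ++ x)) → a = b := by
  intro a
  induction a with
  | nil =>
    intro b x _ hb h
    cases b with
    | nil => rfl
    | cons d b' =>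
      exfalso
      have h2 : q :: ([] : List Char) <+: d :: (b' ++ ([q] ++ x)) := by simpa using h
      have hqd : q = d := (List.cons_prefix_cons.mp h2).1
      have := hb d (by simp)
      rcases hq with h' | h' <;> rw [← hqd, h'] at this <;> simp at this
  | cons c a' ih =>
    intro b x ha hb h
    cases b with
    | nil =>
      exfalso
      have h2 : c :: (a' ++ [q]) <+: q :: x := by simpa using h
      have hcq : c = q := (List.cons_prefix_cons.mp h2).1
      have := ha c (by simp)
      rcases hq with h' | h' <;> rw [hcq, h'] at this <;> simp at this
    | cons d b' =>
      have h2 : c :: (a' ++ [q]) <+: d :: (b' ++ ([q] ++ x)) := by simpa using h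
      rcases List.cons_prefix_cons.mp h2 with ⟨hcd, h'⟩
      rw [hcd, ih b' x (fun e he => ha e (by simp [he])) (fun e he => hb e (by simp [he])) h']

-- decompositions of prefixes and infixes through an append
theorem pvPrefixSplit : ∀ (x ch y : List Char), ch <+: x ++ y →
    ch <+: x ∨ ∃ y₁, y₁ <+: y ∧ ch = x ++ y₁ := by
  intro x
  induction x with
  | nil => intro ch y h; exact Or.inr ⟨ch, by simpa using h, by simp⟩
  | cons a x' ih =>
    intro ch y h
    cases ch with
    | nil => exact Or.inl (List.nil_prefix)
    | cons c ch' =>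
      rcases List.cons_prefix_cons.mp (by simpa using h) with ⟨hca, h'⟩
      rcases ih ch' y h' with h'' | ⟨y₁, hy, rfl⟩
      · exact Or.inl (List.cons_prefix_cons.mpr ⟨hca, h''⟩)
      · exact Or.inr ⟨y₁, hy, by simp [hca]⟩

theorem pvInfixSplit : ∀ (x ch y : List Char), ch <:+: x ++ y →
    ch <:+: x ∨ ch <:+: y ∨ ∃ x₂ y₁, x₂ <:+ x ∧ y₁ <+: y ∧ x₂ ≠ [] ∧ ch = x₂ ++ y₁ := by
  intro x
  induction x with
  | nil => intro ch y h; exact Or.inr (Or.inl (by simpa using h))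
  | cons a x' ih =>
    intro ch y h
    rcases List.infix_cons_iff.mp (by simpa using h) with h' | h'
    · rcases pvPrefixSplit (a :: x') ch y h' with h'' | ⟨y₁, hy, rfl⟩
      · exact Or.inl h''.isInfix
      · exact Or.inr (Or.inr ⟨a :: x', y₁, List.suffix_refl _, hy, by simp, rfl⟩)
    · rcases ih ch y h' with h'' | h'' | ⟨x₂, y₁, hx, hy, hne, rfl⟩
      · exact Or.inl (List.infix_cons_iff.mpr (Or.inr h''))
      · exact Or.inr (Or.inl h'')
      · exact Or.inr (Or.inr ⟨x₂, y₁, hx.trans (List.suffix_cons _ _), hy, hne, rfl⟩)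

-- nonempty suffixes of q :: (F ++ [q])
theorem pvSuffixOfQuoted (q : Char) (F x₂ : List Char) (h : x₂ <:+ q :: (F ++ [q])) :
    x₂ = q :: (F ++ [q]) ∨ x₂ = [] ∨ ∃ F₂, F₂ <:+ F ∧ x₂ = F₂ ++ [q] := by
  rcases List.suffix_cons_iff.mp h with h' | h'
  · exact Or.inl h'
  · rcases List.eq_nil_or_concat x₂ with rfl | ⟨F₂, a, rfl⟩
    · exact Or.inr (Or.inl rfl)
    · rcases h' with ⟨pre, hpre⟩
      have h2 : (pre ++ F₂) ++ [a] = F ++ [q] := by simpa using hpre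
      rcases List.append_inj' h2 rfl with ⟨h3, h4⟩
      refine Or.inr (Or.inr ⟨F₂, ⟨pre, h3⟩, by simp [List.singleton_inj.mp h4]⟩)

-- the prefix-extraction lemma: a quote-free word followed by a quote, seen as a prefix of the
-- output of one replace pass, was already there, or ends at a pattern occurrence of that pass
theorem pvExtract (q : Char) (hq : q = '"' ∨ q = '\'') (w F : List Char) :
    ∀ (l u : List Char) (q' : Char), pvQFree u →
      (u ++ [q']) <+: pvRep q w (q :: (F ++ [q])) l →
      (u ++ [q']) <+: l ∨ ∃ t, l = u ++ ((q :: w) ++ t) ∧ q' = q := by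
  intro l
  induction l with
  | nil =>
    intro u q' hu h
    rw [pvRep_nil] at h
    exact absurd (List.prefix_nil.mp h) (by simp)
  | cons c t ih =>
    intro u q' hu h
    by_cases hp : (q :: w) <+: (c :: t)
    · obtain ⟨t₂, ht⟩ := hp
      rw [← ht, pvRep_matched] at h
      cases u with
      | nil =>
        have hq' : q' = q := by simpa using h
        exact Or.inr ⟨t₂, by simp [← ht], hq'⟩
      | cons a u' =>
        exfalso
        have haq : a = q := by
          have := (List.cons_prefix_cons.mp (by simpa using h)).1
          simpa using this
        have := hu a (by simp)
        rcases hq with h' | h' <;> rw [haq, h'] at this <;> simp at this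
    · rw [pvRep_cons_neg _ _ _ _ _ hp] at h
      cases u with
      | nil =>
        have hq' : q' = c := by simpa using h
        refine Or.inl ?_
        simp only [List.nil_append] at *
        rw [hq']
        exact List.cons_prefix_cons.mpr ⟨rfl, List.nil_prefix⟩
      | cons a u' =>
        rcases List.cons_prefix_cons.mp (by simpa using h) with ⟨hac, h'⟩
        rcases ih u' q' (fun e he => hu e (by simp [he])) h' with h'' | ⟨t', rfl, hq'⟩
        · exact Or.inl (by
            simp only [List.cons_append]
            exact List.cons_prefix_cons.mpr ⟨hac, h''⟩)
        · exact Or.inr ⟨t', by simp [hac], hq'⟩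

-- the number of quote characters in a list
def pvQCount (l : List Char) : Nat := l.countP fun c => c == '"' || c == '\''

theorem pvQCount_qfree (l : List Char) (h : pvQFree l) : pvQCount l = 0 :=
  List.countP_eq_zero.mpr (fun a ha => by
    rcases h a ha with ⟨h1, h2⟩; simp [h1, h2])

theorem pvQCount_quoted (q : Char) (hq : q = '"' ∨ q = '\'') (F : List Char) (hF : pvQFree F) :
    pvQCount (q :: (F ++ [q])) = 2 := by
  have h0 : List.countP (fun c => c == '"' || c == '\'') F = 0 := pvQCount_qfree F hF
  rcases hq with h | h <;>
    simp [pvQCount, List.countP_append, List.countP_cons, h0, h]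

theorem pvQCount_chain (q : Char) (hq : q = '"' ∨ q = '\'') (n1 n2 : List Char)
    (h1 : pvQFree n1) (h2 : pvQFree n2) : pvQCount (pvChain q n1 n2) = 3 := by
  have h01 : List.countP (fun c => c == '"' || c == '\'') n1 = 0 := pvQCount_qfree n1 h1
  have h02 : List.countP (fun c => c == '"' || c == '\'') n2 = 0 := pvQCount_qfree n2 h2
  rcases hq with h | h <;>
    simp [pvQCount, pvChain, List.countP_append, List.countP_cons, h01, h02, h]

-- a head match cannot be created by a replace pass
theorem pvHeadPres (q : Char) (hq : q = '"' ∨ q = '\'') (n F : List Char) (hF : pvQFree F)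
    (c q' : Char) (n' : List Char) (hn' : pvQFree n') (s : List Char)
    (h : pvPat q' n' <+: c :: pvRep q (n ++ [q]) (q :: (F ++ [q])) s) :
    pvPat q' n' <+: c :: s ∨ pvChain q n' n <:+: c :: s := by
  rcases List.cons_prefix_cons.mp (by simpa [pvPat] using h) with ⟨hq'c, h'⟩
  rcases pvExtract q hq (n ++ [q]) F s n' q' hn' h' with h'' | ⟨t, rfl, rfl⟩
  · exact Or.inl (by simpa [pvPat] using List.cons_prefix_cons.mpr ⟨hq'c, h''⟩)
  · refine Or.inr (List.IsPrefix.isInfix ⟨t, ?_⟩)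
    simp [pvChain, ← hq'c]

-- pvNoChain is inherited by infixes
theorem pvNoChain_infix {l l' : List Char} (h : l' <:+: l) (hnc : pvNoChain l) : pvNoChain l' :=
  fun q hq n1 h1 n2 h2 hi => hnc q hq n1 h1 n2 h2 (hi.trans h)

theorem pvNoChain_nil : pvNoChain [] := by
  intro q hq n1 h1 n2 h2 hi
  have := List.eq_nil_of_infix_nil hi
  simp [pvChain] at this

theorem pvQuotes_mem {q : Char} (h : q ∈ pvQuotes) : q = '"' ∨ q = '\'' := by
  simpa [pvQuotes] using h

-- one replace pass preserves chain-freeness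
theorem pvNCpres (q : Char) (hq : q = '"' ∨ q = '\'') (n : List Char) (hn : n ∈ pvCharNames)
    (F : List Char) (hF : pvQFree F) (hFn : F ∉ pvCharNames) :
    ∀ N l, l.length ≤ N → pvNoChain l →
      pvNoChain (pvRep q (n ++ [q]) (q :: (F ++ [q])) l) := by
  intro N
  induction N with
  | zero =>
    intro l hl hnc
    have : l = [] := List.length_eq_zero_iff.mp (Nat.le_zero.mp hl)
    subst this
    rw [pvRep_nil]; exact pvNoChain_nil
  | succ N ih =>
    intro l hl hnc
    cases l with
    | nil => rw [pvRep_nil]; exact pvNoChain_nil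
    | cons c t =>
      by_cases hp : (q :: (n ++ [q])) <+: (c :: t)
      · obtain ⟨t₂, ht⟩ := hp
        rw [← ht, pvRep_matched]
        have hsub : t₂ <:+: c :: t := by
          rw [← ht]; exact (List.suffix_append _ _).isInfix
        have hnc2 : pvNoChain t₂ := pvNoChain_infix hsub hnc
        have hlen : t₂.length ≤ N := by
          have h6 := congrArg List.length ht
          have h7 : t.length + 1 ≤ N + 1 := by simpa using hl
          simp at h6
          omega
        have ihrep := ih t₂ hlen hnc2
        intro q₀ hq₀ n1 h1 n2 h2 hch
        have hq₀' := pvQuotes_mem hq₀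
        rcases pvInfixSplit _ _ _ hch with hA | hB | ⟨x₂, y₁, hx, hy, hxne, hchEq⟩
        · -- a chain cannot fit inside the replacement text: it has three quotes, r has two
          have hcnt := List.Sublist.countP_le (p := fun c => c == '"' || c == '\'') hA.sublist
          rw [show List.countP (fun c => c == '"' || c == '\'') (pvChain q₀ n1 n2) = pvQCount (pvChain q₀ n1 n2) from rfl,
            show List.countP (fun c => c == '"' || c == '\'') (q :: (F ++ [q])) = pvQCount (q :: (F ++ [q])) from rfl,
            pvQCount_chain q₀ hq₀' n1 n2 (pvNames_qfree n1 h1) (pvNames_qfree n2 h2),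
            pvQCount_quoted q hq F hF] at hcnt
          omega
        · exact ihrep q₀ hq₀ n1 h1 n2 h2 hB
        · rcases pvSuffixOfQuoted q F x₂ hx with rfl | rfl | ⟨F₂, hF₂, rfl⟩
          · -- the whole replacement is a prefix of the chain: forces F = n1 ∈ names
            have hpre : (q :: (F ++ [q])) <+: pvChain q₀ n1 n2 := by
              rw [hchEq]; exact List.prefix_append _ _
            rcases List.cons_prefix_cons.mp (by simpa [pvChain] using hpre) with ⟨hqq₀, hpre'⟩
            subst hqq₀
            have : F = n1 := by
              refine pvLemU q hq F n1 (n2 ++ [q]) hF (pvNames_qfree n1 h1) ?_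
              simpa [List.append_assoc] using hpre'
            exact hFn (this ▸ h1)
          · exact hxne rfl
          · cases F₂ with
            | cons a F₂' =>
              -- the chain head would be a quote-free character of F
              have haq : a = q₀ := by
                have := congrArg (fun l => l.head?) hchEq
                simpa [pvChain] using this.symm
              have haF : a ∈ F := hF₂.subset (by simp)
              rcases hF a haF with ⟨ha1, ha2⟩
              rcases hq₀' with h' | h' <;> rw [h'] at haq <;> [exact ha1 haq; exact ha2 haq]
            | nil =>
              -- x₂ = [q]: the chain continues into the replaced tail
              have hq₀q : q₀ = q := by
                have := congrArg (fun l => l.head?) hchEq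
                simpa [pvChain] using this
              have h8 : q = q₀ := hq₀q.symm
              subst h8
              have hy₁ : y₁ = n1 ++ (q :: (n2 ++ [q])) := by
                have h5 : q :: (n1 ++ (q :: (n2 ++ [q]))) = q :: y₁ := by
                  simpa [pvChain] using hchEq
                exact (List.cons_eq_cons.mp h5).2.symm
              have hpre1 : (n1 ++ [q]) <+: pvRep q (n ++ [q]) (q :: (F ++ [q])) t₂ := by
                refine List.IsPrefix.trans ⟨n2 ++ [q], ?_⟩ (hy₁ ▸ hy)
                simp [List.append_assoc]
              rcases pvExtract q hq (n ++ [q]) F t₂ n1 q (pvNames_qfree n1 h1) hpre1 with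
                hcase | ⟨t₃, rfl, -⟩
              · -- t₂ itself starts with n1 ++ [q]: chain q n n1 was already in l
                obtain ⟨z, hz⟩ := hcase
                refine absurd ?_ (hnc q (by rcases hq with h'|h' <;> simp [pvQuotes, h'])
                  n hn n1 h1)
                refine List.IsPrefix.isInfix ⟨z, ?_⟩
                rw [← ht, ← hz]
                simp [pvChain, List.append_assoc]
              · -- t₂ starts with n1 followed by another pattern occurrence: same chain
                refine absurd ?_ (hnc q (by rcases hq with h'|h' <;> simp [pvQuotes, h'])
                  n hn n1 h1)
                refine List.IsPrefix.isInfix ⟨(n ++ [q]) ++ t₃, ?_⟩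
                rw [← ht]
                simp [pvChain, List.append_assoc]
      · rw [pvRep_cons_neg _ _ _ _ _ hp]
        have hnct : pvNoChain t := pvNoChain_infix (List.infix_cons_iff.mpr (Or.inr (List.infix_refl t))) hnc
        have ihrep := ih t (by simpa using Nat.le_of_succ_le_succ (by simpa using hl)) hnct
        intro q₀ hq₀ n1 h1 n2 h2 hch
        have hq₀' := pvQuotes_mem hq₀
        rcases List.infix_cons_iff.mp hch with hpre | htl
        · rcases List.cons_prefix_cons.mp (by simpa [pvChain] using hpre) with ⟨hq₀c, hpre'⟩
          have hpre1 : (n1 ++ [q₀]) <+: pvRep q (n ++ [q]) (q :: (F ++ [q])) t := by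
            refine List.IsPrefix.trans ⟨n2 ++ [q₀], ?_⟩ hpre'
            simp [List.append_assoc]
          rcases pvExtract q hq (n ++ [q]) F t n1 q₀ (pvNames_qfree n1 h1) hpre1 with
            hcase | ⟨t₃, rfl, rfl⟩
          · -- t starts with n1 ++ [q₀]; walk past it and extract again
            obtain ⟨t₂, ht₂⟩ := hcase
            have hrw : pvRep q (n ++ [q]) (q :: (F ++ [q])) t
                = n1 ++ pvRep q (n ++ [q]) (q :: (F ++ [q])) (q₀ :: t₂) := by
              rw [← ht₂, List.append_assoc]
              exact pvRep_qfree_append q (n ++ [q]) _ hq n1 (pvNames_qfree n1 h1) _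
            rw [hrw] at hpre'
            have hpre2 : (q₀ :: (n2 ++ [q₀])) <+: pvRep q (n ++ [q]) (q :: (F ++ [q])) (q₀ :: t₂) := by
              refine (List.prefix_append_right_inj n1).mp ?_
              simpa [List.append_assoc] using hpre'
            by_cases hp2 : (q :: (n ++ [q])) <+: (q₀ :: t₂)
            · obtain ⟨t₃, ht₃⟩ := hp2
              rw [← ht₃, pvRep_matched] at hpre2
              rcases List.cons_prefix_cons.mp (by simpa using hpre2) with ⟨hq₀q, hpre3⟩
              have : n2 = F := by
                refine pvLemU q₀ hq₀' n2 F (pvRep q (n ++ [q]) (q :: (F ++ [q])) t₃)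
                  (pvNames_qfree n2 h2) hF ?_
                rw [hq₀q] at hpre3 ⊢
                simpa [List.append_assoc] using hpre3
              exact hFn (this ▸ h2)
            · rw [pvRep_cons_neg _ _ _ _ _ hp2] at hpre2
              have hpre3 : (n2 ++ [q₀]) <+: pvRep q (n ++ [q]) (q :: (F ++ [q])) t₂ :=
                (List.cons_prefix_cons.mp hpre2).2
              rcases pvExtract q hq (n ++ [q]) F t₂ n2 q₀ (pvNames_qfree n2 h2) hpre3 with
                hcase2 | ⟨t₄, rfl, rfl⟩
              · -- the chain was already in l
                obtain ⟨z, hz⟩ := hcase2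
                refine absurd ?_ (hnc q₀ hq₀ n1 h1 n2 h2)
                refine List.IsPrefix.isInfix ⟨z, ?_⟩
                rw [show (c :: t) = c :: (n1 ++ [q₀] ++ t₂) from by rw [ht₂],
                  ← hz, ← hq₀c]
                simp [pvChain, List.append_assoc]
              · refine absurd ?_ (hnc q₀ hq₀ n1 h1 n2 h2)
                refine List.IsPrefix.isInfix ⟨(n ++ [q₀]) ++ t₄, ?_⟩
                rw [show (c :: t) = c :: (n1 ++ [q₀] ++ (n2 ++ ((q₀ :: (n ++ [q₀])) ++ t₄))) from by rw [ht₂],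
                  ← hq₀c]
                simp [pvChain, List.append_assoc]
          · -- t = n1 ++ pattern ++ t₃ : chain q n1 n already in l
            refine absurd ?_ (hnc q₀ hq₀ n1 h1 n hn)
            refine List.IsPrefix.isInfix ⟨t₃, ?_⟩
            rw [← hq₀c]
            simp [pvChain, List.append_assoc]
        · exact ihrep q₀ hq₀ n1 h1 n2 h2 htl

-- the fourteen replace passes of A, as (quote, name) pairs in A's order
def pvPass (f : List Char) (s : List Char) (p : Char × List Char) : List Char :=
  pvRep p.1 (p.2 ++ [p.1]) (p.1 :: (f ++ [p.1])) s
def pvPairs : List (Char × List Char) := pvCharNames.flatMap fun n => [('"', n), ('\'', n)]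
def pvFold (f l : List Char) (ps : List (Char × List Char)) : List Char := ps.foldl (pvPass f) l

theorem pvPairs_mem : ∀ p ∈ pvPairs, (p.1 = '"' ∨ p.1 = '\'') ∧ p.2 ∈ pvCharNames := by
  intro p hp
  simp only [pvPairs, List.mem_flatMap] at hp
  rcases hp with ⟨n, hn, hmem⟩
  simp only [List.mem_cons, List.mem_singleton] at hmem
  rcases hmem with rfl | rfl | h
  · exact ⟨Or.inl rfl, hn⟩
  · exact ⟨Or.inr rfl, hn⟩
  · simp at h

theorem pvPairs_of_mem (q : Char) (hq : q = '"' ∨ q = '\'') (n : List Char)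
    (hn : n ∈ pvCharNames) : (q, n) ∈ pvPairs := by
  simp only [pvPairs, List.mem_flatMap]
  exact ⟨n, hn, by rcases hq with h | h <;> simp [h]⟩

theorem pvQuotes_of (q : Char) (hq : q = '"' ∨ q = '\'') : q ∈ pvQuotes := by
  rcases hq with h | h <;> simp [pvQuotes, h]

-- a first-occurrence split of a list at a member
theorem pvFirstSplit {α : Type} [DecidableEq α] {a : α} :
    ∀ {l : List α}, a ∈ l → ∃ l₁ l₂, l = l₁ ++ a :: l₂ ∧ a ∉ l₁ := by
  intro l
  induction l with
  | nil => intro h; simp at h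
  | cons b l' ih =>
    intro h
    by_cases hab : a = b
    · exact ⟨[], l', by simp [hab], by simp⟩
    · rcases ih (by rcases List.mem_cons.mp h with h' | h'; exact absurd h' hab; exact h') with
        ⟨l₁, l₂, rfl, hnot⟩
      exact ⟨b :: l₁, l₂, by simp, by simp [hab, hnot]⟩

-- bridges from the String ports to the List Char machinery
theorem pvAlt_toList (code input_file : String) :
    (normalize_task_a_code_alt code input_file).toList = pvScan input_file.toList code.toList := by
  simp [normalize_task_a_code_alt]

theorem pvPassA_dq (c name f : String) :
    (PySem.Str.replace c ("\"" ++ name ++ "\"") ("\"" ++ f ++ "\"")).toList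
      = pvPass f.toList c.toList ('"', name.toList) := by
  have h1 : ("\"" ++ name ++ "\"").toList = '"' :: (name.toList ++ ['"']) := by
    simp [String.toList_append]
  have h2 : ("\"" ++ f ++ "\"").toList = '"' :: (f.toList ++ ['"']) := by
    simp [String.toList_append]
  rw [PySem.Str.toList_replace, h1, h2, pvReplace_eq]
  rfl

theorem pvPassA_sq (c name f : String) :
    (PySem.Str.replace c ("'" ++ name ++ "'") ("'" ++ f ++ "'")).toList
      = pvPass f.toList c.toList ('\'', name.toList) := by
  have h1 : ("'" ++ name ++ "'").toList = '\'' :: (name.toList ++ ['\'']) := by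
    simp [String.toList_append]
  have h2 : ("'" ++ f ++ "'").toList = '\'' :: (f.toList ++ ['\'']) := by
    simp [String.toList_append]
  rw [PySem.Str.toList_replace, h1, h2, pvReplace_eq]
  rfl

theorem pvA_fold (f : String) : ∀ (ns : List String) (c : String),
    (List.foldl (fun c name =>
        PySem.Str.replace (PySem.Str.replace c ("\"" ++ name ++ "\"") ("\"" ++ f ++ "\""))
          ("'" ++ name ++ "'") ("'" ++ f ++ "'")) c ns).toList
      = pvFold f.toList c.toList ((ns.map String.toList).flatMap fun n => [('"', n), ('\'', n)]) := by
  intro ns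
  induction ns with
  | nil => intro c; simp [pvFold]
  | cons name ns' ih =>
    intro c
    rw [List.foldl_cons, ih]
    simp only [List.map_cons, List.flatMap_cons]
    simp only [pvFold]
    rw [List.foldl_append]
    congr 1
    simp only [List.foldl_cons, List.foldl_nil]
    rw [← pvPassA_dq c name f, ← pvPassA_sq _ name f]

theorem pvA_toList (code input_file : String) :
    (normalize_task_a_code code input_file).toList = pvFold input_file.toList code.toList pvPairs := by
  have h := pvA_fold input_file pvNamesS code
  exact h

-- basic fold facts
theorem pvFold_nil (f : List Char) : ∀ ps, pvFold f [] ps = [] := by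
  intro ps
  induction ps with
  | nil => rfl
  | cons p ps' ih =>
    rw [pvFold, List.foldl_cons]
    have : pvPass f [] p = [] := pvRep_nil _ _ _
    rw [this]; exact ih

theorem pvFold_noop (f l : List Char) (hl : pvNoPat l) :
    ∀ ps, (∀ p ∈ ps, p ∈ pvPairs) → pvFold f l ps = l := by
  intro ps
  induction ps with
  | nil => intro _; rfl
  | cons p ps' ih =>
    intro hsub
    rcases pvPairs_mem p (hsub p (by simp)) with ⟨hq, hn⟩
    have hno : pvPass f l p = l := by
      refine pvRep_noop _ _ _ _ ?_
      exact fun hi => hl p.1 (pvQuotes_of p.1 hq) p.2 hn (by simpa [pvPat] using hi)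
    rw [pvFold, List.foldl_cons, hno]
    exact ih (fun p' hp' => hsub p' (by simp [hp']))

-- one pass through a head with no pattern occurrence, keeping the invariants
theorem pvFold1 (f : List Char) (hf : pvQFree f) (hfn : f ∉ pvCharNames) :
    ∀ ps, (∀ p ∈ ps, p ∈ pvPairs) → ∀ c s, pvNoChain (c :: s) →
      (∀ p ∈ pvPairs, ¬ pvPat p.1 p.2 <+: c :: s) →
      pvFold f (c :: s) ps = c :: pvFold f s ps ∧ pvNoChain (c :: pvFold f s ps) ∧
        (∀ p ∈ pvPairs, ¬ pvPat p.1 p.2 <+: c :: pvFold f s ps) := by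
  intro ps
  induction ps with
  | nil => intro _ c s hnc hnh; exact ⟨rfl, hnc, hnh⟩
  | cons p ps' ih =>
    intro hsub c s hnc hnh
    rcases pvPairs_mem p (hsub p (by simp)) with ⟨hq, hn⟩
    have hstep : pvPass f (c :: s) p = c :: pvPass f s p := by
      refine pvRep_cons_neg _ _ _ _ _ ?_
      exact fun hp => hnh p (hsub p (by simp)) (by simpa [pvPat] using hp)
    have hnc' : pvNoChain (c :: pvPass f s p) := by
      rw [← hstep]
      exact pvNCpres p.1 hq p.2 hn f hf hfn (c :: s).length (c :: s) le_rfl hnc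
    have hnh' : ∀ p' ∈ pvPairs, ¬ pvPat p'.1 p'.2 <+: c :: pvPass f s p := by
      intro p' hp' hpat
      rcases pvPairs_mem p' hp' with ⟨hq', hn'⟩
      rcases pvHeadPres p.1 hq p.2 f hf c p'.1 p'.2 (pvNames_qfree p'.2 hn') s hpat with
        h' | h'
      · exact hnh p' hp' h'
      · exact hnc p.1 (pvQuotes_of p.1 hq) p'.2 hn' p.2 hn h'
    rcases ih (fun p' hp' => hsub p' (by simp [hp'])) c (pvPass f s p) hnc' hnh' with
      ⟨he, hnc'', hnh''⟩
    exact ⟨by rw [pvFold, List.foldl_cons, hstep]; exact he, hnc'', hnh''⟩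

-- a pass other than (q, n) leaves a leading quoted placeholder q n q untouched
theorem pvPassPat (f : List Char) (hfn : f ∉ pvCharNames)
    (q : Char) (hq : q = '"' ∨ q = '\'') (n : List Char) (hn : n ∈ pvCharNames)
    (p : Char × List Char) (hp : p ∈ pvPairs) (hne : p ≠ (q, n)) (s : List Char)
    (hnc : pvNoChain (pvPat q n ++ s))
    (hnhq : ∀ p' ∈ pvPairs, ¬ pvPat p'.1 p'.2 <+: q :: s) :
    pvPass f (pvPat q n ++ s) p = pvPat q n ++ pvPass f s p := by
  rcases pvPairs_mem p hp with ⟨hq', hn'⟩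
  obtain ⟨q', n'⟩ := p
  have hhead : ¬ (q' :: (n' ++ [q'])) <+: (q :: ((n ++ [q]) ++ s)) := by
    intro hpre
    rcases List.cons_prefix_cons.mp hpre with ⟨hqq, hpre'⟩
    subst hqq
    have : n' = n := by
      refine pvLemU q' (by simpa using hq') n' n s (pvNames_qfree n' hn') (pvNames_qfree n hn) ?_
      simpa [List.append_assoc] using hpre'
    exact hne (by simp [this])
  have hinner : ¬ (q' :: (n' ++ [q'])) <+: (q :: s) :=
    fun hpre => hnhq (q', n') hp (by simpa [pvPat] using hpre)
  calc pvPass f (pvPat q n ++ s) (q', n')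
      = pvRep q' (n' ++ [q']) (q' :: (f ++ [q'])) (q :: ((n ++ [q]) ++ s)) := by
        simp [pvPass, pvPat]
    _ = q :: pvRep q' (n' ++ [q']) (q' :: (f ++ [q'])) ((n ++ [q]) ++ s) := by
        rw [pvRep_cons_neg _ _ _ _ _ hhead]
    _ = q :: (n ++ pvRep q' (n' ++ [q']) (q' :: (f ++ [q'])) (q :: s)) := by
        rw [List.append_assoc]
        rw [pvRep_qfree_append q' (n' ++ [q']) _ (by simpa using hq') n (pvNames_qfree n hn) _]
        simp
    _ = q :: (n ++ (q :: pvRep q' (n' ++ [q']) (q' :: (f ++ [q'])) s)) := by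
        rw [pvRep_cons_neg _ _ _ _ _ hinner]
    _ = pvPat q n ++ pvPass f s (q', n') := by
        simp [pvPat, pvPass]

-- any pass leaves a leading replaced block q f q untouched
theorem pvPassR (f : List Char) (hf : pvQFree f) (hfn : f ∉ pvCharNames)
    (q : Char) (hq : q = '"' ∨ q = '\'')
    (p : Char × List Char) (hp : p ∈ pvPairs) (s : List Char)
    (hnhq : ∀ p' ∈ pvPairs, ¬ pvPat p'.1 p'.2 <+: q :: s) :
    pvPass f ((q :: (f ++ [q])) ++ s) p = (q :: (f ++ [q])) ++ pvPass f s p := by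
  rcases pvPairs_mem p hp with ⟨hq', hn'⟩
  obtain ⟨q', n'⟩ := p
  have hhead : ¬ (q' :: (n' ++ [q'])) <+: (q :: ((f ++ [q]) ++ s)) := by
    intro hpre
    rcases List.cons_prefix_cons.mp hpre with ⟨hqq, hpre'⟩
    subst hqq
    have : n' = f := by
      refine pvLemU q' (by simpa using hq') n' f s (pvNames_qfree n' hn') hf ?_
      simpa [List.append_assoc] using hpre'
    exact hfn (this ▸ hn')
  have hinner : ¬ (q' :: (n' ++ [q'])) <+: (q :: s) :=
    fun hpre => hnhq (q', n') hp (by simpa [pvPat] using hpre)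
  calc pvPass f ((q :: (f ++ [q])) ++ s) (q', n')
      = pvRep q' (n' ++ [q']) (q' :: (f ++ [q'])) (q :: ((f ++ [q]) ++ s)) := by
        simp [pvPass]
    _ = q :: pvRep q' (n' ++ [q']) (q' :: (f ++ [q'])) ((f ++ [q]) ++ s) := by
        rw [pvRep_cons_neg _ _ _ _ _ hhead]
    _ = q :: (f ++ pvRep q' (n' ++ [q']) (q' :: (f ++ [q'])) (q :: s)) := by
        rw [List.append_assoc]
        rw [pvRep_qfree_append q' (n' ++ [q']) _ (by simpa using hq') f hf _]
        simp
    _ = q :: (f ++ (q :: pvRep q' (n' ++ [q']) (q' :: (f ++ [q'])) s)) := by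
        rw [pvRep_cons_neg _ _ _ _ _ hinner]
    _ = (q :: (f ++ [q])) ++ pvPass f s (q', n') := by
        simp [pvPass]

-- a run of passes all different from (q, n) leaves a leading q n q untouched
theorem pvFoldPat (f : List Char) (hf : pvQFree f) (hfn : f ∉ pvCharNames)
    (q : Char) (hq : q = '"' ∨ q = '\'') (n : List Char) (hn : n ∈ pvCharNames) :
    ∀ ps, (∀ p ∈ ps, p ∈ pvPairs) → (∀ p ∈ ps, p ≠ (q, n)) → ∀ s,
      pvNoChain (pvPat q n ++ s) → (∀ p' ∈ pvPairs, ¬ pvPat p'.1 p'.2 <+: q :: s) →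
      pvFold f (pvPat q n ++ s) ps = pvPat q n ++ pvFold f s ps ∧
        pvNoChain (pvPat q n ++ pvFold f s ps) ∧
        (∀ p' ∈ pvPairs, ¬ pvPat p'.1 p'.2 <+: q :: pvFold f s ps) := by
  intro ps
  induction ps with
  | nil => intro _ _ s hnc hnh; exact ⟨rfl, hnc, hnh⟩
  | cons p ps' ih =>
    intro hsub hne s hnc hnh
    rcases pvPairs_mem p (hsub p (by simp)) with ⟨hqp, hnp⟩
    have hsufx : (q :: s) <:+ pvPat q n ++ s := ⟨q :: n, by simp [pvPat]⟩
    have hstep := pvPassPat f hfn q hq n hn p (hsub p (by simp)) (hne p (by simp)) s hnc hnh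
    have hnc' : pvNoChain (pvPat q n ++ pvPass f s p) := by
      rw [← hstep]
      exact pvNCpres p.1 hqp p.2 hnp f hf hfn (pvPat q n ++ s).length _ le_rfl hnc
    have hnh' : ∀ p' ∈ pvPairs, ¬ pvPat p'.1 p'.2 <+: q :: pvPass f s p := by
      intro p' hp' hpre
      rcases pvPairs_mem p' hp' with ⟨hq', hn'⟩
      rcases pvHeadPres p.1 hqp p.2 f hf q p'.1 p'.2 (pvNames_qfree p'.2 hn') s hpre with
        h' | h'
      · exact hnh p' hp' h'
      · exact hnc p.1 (pvQuotes_of p.1 hqp) p'.2 hn' p.2 hnp (h'.trans hsufx.isInfix)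
    rcases ih (fun p' h' => hsub p' (by simp [h'])) (fun p' h' => hne p' (by simp [h']))
      (pvPass f s p) hnc' hnh' with ⟨he, hnc'', hnh''⟩
    refine ⟨?_, hnc'', hnh''⟩
    rw [pvFold, List.foldl_cons, hstep]
    exact he

-- a run of passes leaves a leading replaced block q f q untouched
theorem pvFoldR (f : List Char) (hf : pvQFree f) (hfn : f ∉ pvCharNames)
    (q : Char) (hq : q = '"' ∨ q = '\'') :
    ∀ ps, (∀ p ∈ ps, p ∈ pvPairs) → ∀ s,
      pvNoChain ((q :: (f ++ [q])) ++ s) → (∀ p' ∈ pvPairs, ¬ pvPat p'.1 p'.2 <+: q :: s) →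
      pvFold f ((q :: (f ++ [q])) ++ s) ps = (q :: (f ++ [q])) ++ pvFold f s ps := by
  intro ps
  induction ps with
  | nil => intro _ s _ _; rfl
  | cons p ps' ih =>
    intro hsub s hnc hnh
    rcases pvPairs_mem p (hsub p (by simp)) with ⟨hqp, hnp⟩
    have hsufx : (q :: s) <:+ (q :: (f ++ [q])) ++ s := ⟨q :: f, by simp⟩
    have hstep := pvPassR f hf hfn q hq p (hsub p (by simp)) s hnh
    have hnc' : pvNoChain ((q :: (f ++ [q])) ++ pvPass f s p) := by
      rw [← hstep]
      exact pvNCpres p.1 hqp p.2 hnp f hf hfn ((q :: (f ++ [q])) ++ s).length _ le_rfl hnc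
    have hnh' : ∀ p' ∈ pvPairs, ¬ pvPat p'.1 p'.2 <+: q :: pvPass f s p := by
      intro p' hp' hpre
      rcases pvPairs_mem p' hp' with ⟨hq', hn'⟩
      rcases pvHeadPres p.1 hqp p.2 f hf q p'.1 p'.2 (pvNames_qfree p'.2 hn') s hpre with
        h' | h'
      · exact hnh p' hp' h'
      · exact hnc p.1 (pvQuotes_of p.1 hqp) p'.2 hn' p.2 hnp (h'.trans hsufx.isInfix)
    have he := ih (fun p' h' => hsub p' (by simp [h'])) (pvPass f s p) hnc' hnh'
    rw [pvFold, List.foldl_cons, hstep]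
    exact he

-- pvNoPat is inherited by infixes
theorem pvNoPat_infix {l l' : List Char} (h : l' <:+: l) (hnp : pvNoPat l) : pvNoPat l' :=
  fun q hq n hn hi => hnp q hq n hn (hi.trans h)

theorem pvFindName_eq_none (c : Char) (rest : List Char)
    (h : ∀ n ∈ pvCharNames, ¬ (n ++ [c]) <+: rest) : pvFindName c rest = none := by
  refine List.find?_eq_none.mpr ?_
  intro n hn
  simpa [List.isPrefixOf_iff_prefix] using h n hn

theorem pvScan_cons_nomatch (f : List Char) (c : Char) (rest : List Char)
    (hnh : ∀ p ∈ pvPairs, ¬ pvPat p.1 p.2 <+: c :: rest) :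
    pvScan f (c :: rest) = c :: pvScan f rest := by
  rw [pvScan]
  by_cases hcq : c = '"' ∨ c = '\''
  · have hnone : pvFindName c rest = none := by
      refine pvFindName_eq_none _ _ ?_
      intro n hn hp
      refine hnh (c, n) (pvPairs_of_mem c hcq n hn) ?_
      show pvPat c n <+: c :: rest
      have : pvPat c n = c :: (n ++ [c]) := rfl
      rw [this]
      exact List.cons_prefix_cons.mpr ⟨rfl, hp⟩
    rw [if_pos hcq, hnone]
  · rw [if_neg hcq]

theorem pvScan_noop (f : List Char) : ∀ l, pvNoPat l → pvScan f l = l := by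
  intro l
  induction l with
  | nil => intro _; rw [pvScan]
  | cons c rest ih =>
    intro hnp
    have hnh : ∀ p ∈ pvPairs, ¬ pvPat p.1 p.2 <+: c :: rest := by
      intro p hp hpre
      rcases pvPairs_mem p hp with ⟨hq, hn⟩
      exact hnp p.1 (pvQuotes_of p.1 hq) p.2 hn hpre.isInfix
    rw [pvScan_cons_nomatch f c rest hnh,
      ih (pvNoPat_infix (List.infix_cons_iff.mpr (Or.inr (List.infix_refl rest))) hnp)]

-- find? returns the unique satisfying element
theorem pvFindUnique (P : List Char → Bool) (a : List Char) :
    ∀ l : List (List Char), a ∈ l → P a = true → (∀ b ∈ l, P b = true → b = a) →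
      List.find? P l = some a := by
  intro l
  induction l with
  | nil => intro h; simp at h
  | cons b l' ih =>
    intro hmem hPa huniq
    by_cases hb : P b = true
    · rw [List.find?_cons_of_pos hb, huniq b (by simp) hb]
    · have hab : a ≠ b := fun h => hb (h ▸ hPa)
      have : a ∈ l' := by
        rcases List.mem_cons.mp hmem with h | h
        · exact absurd h hab
        · exact h
      rw [List.find?_cons_of_neg (by simpa using hb)]
      exact ih this hPa (fun b' hb' => huniq b' (by simp [hb']))

theorem pvFindName_match (q : Char) (hq : q = '"' ∨ q = '\'') (n : List Char)
    (hn : n ∈ pvCharNames) (t : List Char) :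
    pvFindName q ((n ++ [q]) ++ t) = some n := by
  refine pvFindUnique _ n pvCharNames hn ?_ ?_
  · exact List.isPrefixOf_iff_prefix.mpr (List.prefix_append _ _)
  · intro b hb hPb
    refine pvLemU q hq b n t (pvNames_qfree b hb) (pvNames_qfree n hn) ?_
    have := List.isPrefixOf_iff_prefix.mp hPb
    simpa [List.append_assoc] using this

theorem pvScan_match (f : List Char) (q : Char) (hq : q = '"' ∨ q = '\'') (n : List Char)
    (hn : n ∈ pvCharNames) (t : List Char) :
    pvScan f (pvPat q n ++ t) = (q :: (f ++ [q])) ++ pvScan f t := by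
  have hshape : pvPat q n ++ t = q :: ((n ++ [q]) ++ t) := by simp [pvPat]
  rw [hshape, pvScan, if_pos hq, pvFindName_match q hq n hn t]
  have hd : ((n ++ [q]) ++ t).drop (n.length + 1) = t := by
    have hlen : (n ++ [q]).length = n.length + 1 := by simp
    rw [← hlen, List.drop_left]
  simp only [hd]

-- the main equivalence on chain-free character lists
theorem pvMain (f : List Char) (hf : pvQFree f) (hfn : f ∉ pvCharNames) :
    ∀ N l, l.length ≤ N → pvNoChain l → pvFold f l pvPairs = pvScan f l := by
  intro N
  induction N with
  | zero =>
    intro l hl hnc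
    have : l = [] := List.length_eq_zero_iff.mp (Nat.le_zero.mp hl)
    subst this
    rw [pvFold_nil, pvScan]
  | succ N ih =>
    intro l hl hnc
    by_cases hhead : ∃ p ∈ pvPairs, pvPat p.1 p.2 <+: l
    · obtain ⟨p, hp, hpat⟩ := hhead
      rcases pvPairs_mem p hp with ⟨hq, hn⟩
      obtain ⟨q, n⟩ := p
      simp only at hq hn
      obtain ⟨t, ht⟩ := hpat
      subst ht
      have hnhq0 : ∀ p' ∈ pvPairs, ¬ pvPat p'.1 p'.2 <+: q :: t := by
        intro p' hp' hpre
        rcases pvPairs_mem p' hp' with ⟨hq', hn'⟩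
        obtain ⟨q', n'⟩ := p'
        simp only at hq' hn'
        rcases List.cons_prefix_cons.mp (by simpa [pvPat] using hpre) with ⟨hqq, hpre'⟩
        subst hqq
        obtain ⟨z, hz⟩ := hpre'
        refine hnc q' (pvQuotes_of q' hq') n hn n' hn' ?_
        refine List.IsPrefix.isInfix ⟨z, ?_⟩
        rw [← hz]
        simp [pvChain, pvPat, List.append_assoc]
      obtain ⟨ps₁, ps₂, hsplit, hnotin⟩ := pvFirstSplit (pvPairs_of_mem q hq n hn)
      have hsub1 : ∀ p' ∈ ps₁, p' ∈ pvPairs := fun p' h' => by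
        rw [hsplit]; exact List.mem_append_left _ h'
      have hsub2 : ∀ p' ∈ ps₂, p' ∈ pvPairs := fun p' h' => by
        rw [hsplit]; exact List.mem_append_right _ (by simp [h'])
      rcases pvFoldPat f hf hfn q hq n hn ps₁ hsub1
        (fun p' h' hqn => hnotin (hqn ▸ h')) t hnc hnhq0 with ⟨he1, hnc1, hnh1⟩
      have hname : pvPass f (pvPat q n ++ pvFold f t ps₁) (q, n)
          = (q :: (f ++ [q])) ++ pvPass f (pvFold f t ps₁) (q, n) := by
        show pvRep q (n ++ [q]) (q :: (f ++ [q])) (pvPat q n ++ pvFold f t ps₁) = _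
        have hshape : pvPat q n ++ pvFold f t ps₁ = (q :: (n ++ [q])) ++ pvFold f t ps₁ := by
          simp [pvPat]
        rw [hshape, pvRep_matched]
        rfl
      have hnc2 : pvNoChain ((q :: (f ++ [q])) ++ pvPass f (pvFold f t ps₁) (q, n)) := by
        rw [← hname]
        exact pvNCpres q hq n hn f hf hfn (pvPat q n ++ pvFold f t ps₁).length _ le_rfl hnc1
      have hsufx1 : (q :: pvFold f t ps₁) <:+ pvPat q n ++ pvFold f t ps₁ :=
        ⟨q :: n, by simp [pvPat]⟩
      have hnh2 : ∀ p' ∈ pvPairs, ¬ pvPat p'.1 p'.2 <+: q :: pvPass f (pvFold f t ps₁) (q, n) := by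
        intro p' hp' hpre
        rcases pvPairs_mem p' hp' with ⟨hq', hn'⟩
        rcases pvHeadPres q hq n f hf q p'.1 p'.2 (pvNames_qfree p'.2 hn')
          (pvFold f t ps₁) hpre with h' | h'
        · exact hnh1 p' hp' h'
        · exact hnc1 q (pvQuotes_of q hq) p'.2 hn' n hn (h'.trans hsufx1.isInfix)
      have he2 := pvFoldR f hf hfn q hq ps₂ hsub2 (pvPass f (pvFold f t ps₁) (q, n)) hnc2 hnh2
      have hfold : pvFold f (pvPat q n ++ t) pvPairs
          = (q :: (f ++ [q])) ++ pvFold f t pvPairs := by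
        rw [hsplit]
        show List.foldl (pvPass f) (pvPat q n ++ t) (ps₁ ++ (q, n) :: ps₂) = _
        rw [List.foldl_append, List.foldl_cons]
        have hx1 : List.foldl (pvPass f) (pvPat q n ++ t) ps₁ = pvPat q n ++ pvFold f t ps₁ := he1
        rw [hx1, hname]
        have hx2 : List.foldl (pvPass f) ((q :: (f ++ [q])) ++ pvPass f (pvFold f t ps₁) (q, n)) ps₂
            = (q :: (f ++ [q])) ++ pvFold f (pvPass f (pvFold f t ps₁) (q, n)) ps₂ := he2
        rw [hx2]
        congr 1
        show pvFold f (pvPass f (pvFold f t ps₁) (q, n)) ps₂ = pvFold f t (ps₁ ++ (q, n) :: ps₂)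
        simp only [pvFold]
        rw [List.foldl_append, List.foldl_cons]
      have hlen : t.length ≤ N := by
        have : (pvPat q n ++ t).length ≤ N + 1 := hl
        simp [pvPat] at this
        omega
      have hnct : pvNoChain t :=
        pvNoChain_infix ((List.suffix_append (pvPat q n) t).isInfix) hnc
      rw [hfold, ih t hlen hnct, pvScan_match f q hq n hn t]
    · push_neg at hhead
      cases l with
      | nil => rw [pvFold_nil, pvScan]
      | cons c rest =>
        rcases pvFold1 f hf hfn pvPairs (fun p hp => hp) c rest hnc hhead with ⟨he, -, -⟩
        have hnct : pvNoChain rest :=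
          pvNoChain_infix (List.infix_cons_iff.mpr (Or.inr (List.infix_refl rest))) hnc
        have hlen : rest.length ≤ N := by
          have : rest.length + 1 ≤ N + 1 := by simpa using hl
          omega
        rw [he, ih rest hlen hnct, ← pvScan_cons_nomatch f c rest hhead]

-- ===== VERDICT (by name: the statement is the Claim_ definition above) =====
theorem normalize_task_a_code_spec : Claim_equal_normalize_task_a_code := by
  intro code input_file hDom hPre
  unfold Spec_normalize_task_a_code
  apply String.toList_inj.mp
  rw [pvA_toList, pvAlt_toList]
  unfold Pre_normalize_task_a_code at hPre
  rcases Bool.or_eq_true_iff.mp hPre with h | h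
  · rw [pvFold_noop input_file.toList code.toList ((pvNoPat_iff _).mp h) pvPairs (fun p hp => hp),
      pvScan_noop input_file.toList code.toList ((pvNoPat_iff _).mp h)]
  · rcases Bool.and_eq_true_iff.mp h with ⟨h12, h3⟩
    rcases Bool.and_eq_true_iff.mp h12 with ⟨h1, h2⟩
    refine pvMain input_file.toList ((pvQFree_iff _).mp h2) ?_ code.toList.length code.toList
      le_rfl ((pvNoChain_iff _).mp h1)
    simpa using h3
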